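-- pv_equiv track=rewrite | github.com/shreyysk/GoCubes | src/solver/moves.py | expand_wide_moves
-- ===== SOURCE A (Python) =====
-- def expand_wide_moves(sequence: str) -> str:
--     """
--     Expand wide moves to basic moves
--
--     Args:
--         sequence: Move sequence with wide moves
--
--     Returns:
--         Equivalent sequence with only basic moves
--     """
--     expansions = {
--         'u': ["U", "E'"],
--         "u'": ["U'", "E"],
--         'u2': ["U2", "E2"],
--         'd': ["D", "E"],
--         "d'": ["D'", "E'"],
--         'd2': ["D2", "E2"],
--         'r': ["R", "M'"],
--         "r'": ["R'", "M"],
--         'r2': ["R2", "M2"],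
--         'l': ["L", "M"],
--         "l'": ["L'", "M'"],
--         'l2': ["L2", "M2"],
--         'f': ["F", "S"],
--         "f'": ["F'", "S'"],
--         'f2': ["F2", "S2"],
--         'b': ["B", "S'"],
--         "b'": ["B'", "S"],
--         'b2': ["B2", "S2"],
--     }
--
--     moves = sequence.split()
--     expanded = []
--
--     for move in moves:
--         if move.lower() in expansions:
--             expanded.extend(expansions[move.lower()])
--         else:
--             expanded.append(move)
--
--     return ' '.join(expanded)
-- ===== SOURCE B (Python) =====
-- FACE = {'u': ('E', True), 'd': ('E', False), 'r': ('M', True),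
--         'l': ('M', False), 'f': ('S', False), 'b': ('S', True)}
--
--
-- def _expand_token(tok):
--     t = tok.lower()
--     if not (1 <= len(t) <= 2) or t[0] not in FACE:
--         return [tok]
--     face = t[0].upper()
--     slice_letter, primed = FACE[t[0]]
--     mod = t[1:]
--     if mod == '':
--         return [face, slice_letter + ("'" if primed else '')]
--     if mod == "'":
--         return [face + "'", slice_letter + ('' if primed else "'")]
--     if mod == '2':
--         return [face + '2', slice_letter + '2']
--     return [tok]
--
--
-- def expand_wide_moves(sequence: str) -> str:
--     return ' '.join(w for tok in sequence.split() for w in _expand_token(tok))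
-- ===== Notes on version B (the rewrite author's own statement) =====
-- stated objective: simpler
-- what changed: Replaces the 18-entry move->expansion table and accumulator loop with a 6-entry per-face map (slice letter + default-prime flag) plus a token decomposer that derives face/modifier/slice-sign, flat-mapped over the tokens.
import Mathlib
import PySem

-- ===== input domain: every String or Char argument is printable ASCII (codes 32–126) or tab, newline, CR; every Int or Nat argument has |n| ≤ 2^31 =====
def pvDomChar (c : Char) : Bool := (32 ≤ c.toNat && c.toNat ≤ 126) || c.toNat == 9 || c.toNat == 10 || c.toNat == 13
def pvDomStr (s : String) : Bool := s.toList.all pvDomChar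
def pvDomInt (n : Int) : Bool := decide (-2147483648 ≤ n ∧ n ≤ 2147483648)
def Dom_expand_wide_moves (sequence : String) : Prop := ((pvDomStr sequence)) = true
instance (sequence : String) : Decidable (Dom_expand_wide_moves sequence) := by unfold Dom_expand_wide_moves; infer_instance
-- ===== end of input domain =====

-- B replaces A's 18-entry wide-move expansion table with a 6-entry per-face map
-- (slice letter + default-prime flag) and a token decomposer, flat-mapped over tokens (objective: simpler).


-- ===== PORT A =====
def pvExpansions : PySem.Dict String (List String) := PySem.Dict.ofList
  [("u", ["U", "E'"]), ("u'", ["U'", "E"]), ("u2", ["U2", "E2"]),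
   ("d", ["D", "E"]), ("d'", ["D'", "E'"]), ("d2", ["D2", "E2"]),
   ("r", ["R", "M'"]), ("r'", ["R'", "M"]), ("r2", ["R2", "M2"]),
   ("l", ["L", "M"]), ("l'", ["L'", "M'"]), ("l2", ["L2", "M2"]),
   ("f", ["F", "S"]), ("f'", ["F'", "S'"]), ("f2", ["F2", "S2"]),
   ("b", ["B", "S'"]), ("b'", ["B'", "S"]), ("b2", ["B2", "S2"])]

def expand_wide_moves (sequence : String) : String :=
  let moves := PySem.Str.split₀ sequence
  let expanded := moves.foldl
    (fun acc move =>
      match pvExpansions.get? (PySem.Str.lower move) with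
      | some e => acc ++ e          -- expanded.extend(expansions[move.lower()])
      | none   => acc ++ [move]) [] -- expanded.append(move)
  PySem.Str.join " " expanded

-- ===== PORT B =====
-- FACE = {'u': ('E', True), 'd': ('E', False), 'r': ('M', True), 'l': ('M', False), 'f': ('S', False), 'b': ('S', True)}
def pvFace : List (Char × Char × Bool) :=
  [('u', ('E', true)), ('d', ('E', false)), ('r', ('M', true)),
   ('l', ('M', false)), ('f', ('S', false)), ('b', ('S', true))]

-- _expand_token: inspect the lowered token as face char + optional modifier
def pvExpandToken (tok : String) : List String :=
  match (PySem.Str.lower tok).toList with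
  | [c] =>
    match pvFace.lookup c with
    | some (sl, pr) =>
        [String.ofList [PySem.Chars.upperChar c], String.ofList (if pr then [sl, '\''] else [sl])]
    | none => [tok]
  | [c, m] =>
    match pvFace.lookup c with
    | some (sl, pr) =>
        if m = '\'' then
          [String.ofList [PySem.Chars.upperChar c, '\''], String.ofList (if pr then [sl] else [sl, '\''])]
        else if m = '2' then
          [String.ofList [PySem.Chars.upperChar c, '2'], String.ofList [sl, '2']]
        else [tok]
    | none => [tok]
  | _ => [tok]

def expand_wide_moves_alt (sequence : String) : String :=
  PySem.Str.join " " ((PySem.Str.split₀ sequence).flatMap pvExpandToken)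

-- ===== PRECONDITION & SPEC =====
def Spec_expand_wide_moves (sequence : String) (out : String) : Prop := out = expand_wide_moves_alt sequence
instance (sequence : String) (out : String) : Decidable (Spec_expand_wide_moves sequence out) := by unfold Spec_expand_wide_moves; infer_instance

-- ===== CLAIM (what is proved, stated in full; the proofs are below) =====
def Claim_equal_expand_wide_moves : Prop := ∀ (sequence : String), Dom_expand_wide_moves sequence → Spec_expand_wide_moves sequence (expand_wide_moves sequence)

-- ===== LEMMAS AND PROOFS =====

lemma pvExpansions_mk : pvExpansions = PySem.Dict.mk
  [("u", ["U", "E'"]), ("u'", ["U'", "E"]), ("u2", ["U2", "E2"]),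
   ("d", ["D", "E"]), ("d'", ["D'", "E'"]), ("d2", ["D2", "E2"]),
   ("r", ["R", "M'"]), ("r'", ["R'", "M"]), ("r2", ["R2", "M2"]),
   ("l", ["L", "M"]), ("l'", ["L'", "M'"]), ("l2", ["L2", "M2"]),
   ("f", ["F", "S"]), ("f'", ["F'", "S'"]), ("f2", ["F2", "S2"]),
   ("b", ["B", "S'"]), ("b'", ["B'", "S"]), ("b2", ["B2", "S2"])] := by decide

lemma pvStrBeq_toList (k l : String) : (k == l) = (k.toList == l.toList) := by
  by_cases h : k = l
  · subst h; simp
  · have h2 : k.toList ≠ l.toList := fun e => h (String.toList_inj.mp e)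
    simp [h, h2]

-- the string-keyed dict lookup of A, re-expressed on char lists
def pvCharDict : PySem.Dict (List Char) (List String) := PySem.Dict.mk
  [(['u'], ["U", "E'"]), (['u', '\''], ["U'", "E"]), (['u', '2'], ["U2", "E2"]),
   (['d'], ["D", "E"]), (['d', '\''], ["D'", "E'"]), (['d', '2'], ["D2", "E2"]),
   (['r'], ["R", "M'"]), (['r', '\''], ["R'", "M"]), (['r', '2'], ["R2", "M2"]),
   (['l'], ["L", "M"]), (['l', '\''], ["L'", "M'"]), (['l', '2'], ["L2", "M2"]),
   (['f'], ["F", "S"]), (['f', '\''], ["F'", "S'"]), (['f', '2'], ["F2", "S2"]),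
   (['b'], ["B", "S'"]), (['b', '\''], ["B'", "S"]), (['b', '2'], ["B2", "S2"])]

lemma pvGet?_eq (l : String) :
    pvExpansions.get? l = pvCharDict.get? l.toList := by
  have k01 : ("u" : String).toList = ['u'] := by decide
  have k02 : ("u'" : String).toList = ['u', '\''] := by decide
  have k03 : ("u2" : String).toList = ['u', '2'] := by decide
  have k04 : ("d" : String).toList = ['d'] := by decide
  have k05 : ("d'" : String).toList = ['d', '\''] := by decide
  have k06 : ("d2" : String).toList = ['d', '2'] := by decide
  have k07 : ("r" : String).toList = ['r'] := by decide
  have k08 : ("r'" : String).toList = ['r', '\''] := by decide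
  have k09 : ("r2" : String).toList = ['r', '2'] := by decide
  have k10 : ("l" : String).toList = ['l'] := by decide
  have k11 : ("l'" : String).toList = ['l', '\''] := by decide
  have k12 : ("l2" : String).toList = ['l', '2'] := by decide
  have k13 : ("f" : String).toList = ['f'] := by decide
  have k14 : ("f'" : String).toList = ['f', '\''] := by decide
  have k15 : ("f2" : String).toList = ['f', '2'] := by decide
  have k16 : ("b" : String).toList = ['b'] := by decide
  have k17 : ("b'" : String).toList = ['b', '\''] := by decide
  have k18 : ("b2" : String).toList = ['b', '2'] := by decide
  rw [pvExpansions_mk]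
  simp only [pvCharDict, PySem.Dict.get?_mk_cons, pvStrBeq_toList,
    k01, k02, k03, k04, k05, k06, k07, k08, k09, k10, k11, k12, k13, k14, k15, k16, k17, k18]
  rfl

lemma pvGet?_nil (x : List Char) :
    (PySem.Dict.mk ([] : List (List Char × List String))).get? x = none := rfl

lemma pvTok_eq (move : String) :
    (match pvExpansions.get? (PySem.Str.lower move) with
     | some e => e
     | none => [move]) = pvExpandToken move := by
  rw [pvGet?_eq]
  rcases hl : (PySem.Str.lower move).toList with _ | ⟨c, _ | ⟨m, _ | ⟨c3, rest⟩⟩⟩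
  · simp only [pvExpandToken, hl]
    simp [pvCharDict, PySem.Dict.get?_mk_cons, pvGet?_nil]
  · simp only [pvExpandToken, hl]
    by_cases hu : c = 'u'; · subst hu; simp [pvCharDict, PySem.Dict.get?_mk_cons, pvGet?_nil, pvFace, List.lookup] <;> decide
    by_cases hd : c = 'd'; · subst hd; simp [pvCharDict, PySem.Dict.get?_mk_cons, pvGet?_nil, pvFace, List.lookup] <;> decide
    by_cases hr : c = 'r'; · subst hr; simp [pvCharDict, PySem.Dict.get?_mk_cons, pvGet?_nil, pvFace, List.lookup] <;> decide
    by_cases hL : c = 'l'; · subst hL; simp [pvCharDict, PySem.Dict.get?_mk_cons, pvGet?_nil, pvFace, List.lookup] <;> decide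
    by_cases hf : c = 'f'; · subst hf; simp [pvCharDict, PySem.Dict.get?_mk_cons, pvGet?_nil, pvFace, List.lookup] <;> decide
    by_cases hb : c = 'b'; · subst hb; simp [pvCharDict, PySem.Dict.get?_mk_cons, pvGet?_nil, pvFace, List.lookup] <;> decide
    have hub : (c == 'u') = false := beq_eq_false_iff_ne.mpr hu
    have huc : ('u' == c) = false := beq_eq_false_iff_ne.mpr (Ne.symm hu)
    have hdb : (c == 'd') = false := beq_eq_false_iff_ne.mpr hd
    have hdc : ('d' == c) = false := beq_eq_false_iff_ne.mpr (Ne.symm hd)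
    have hrb : (c == 'r') = false := beq_eq_false_iff_ne.mpr hr
    have hrc : ('r' == c) = false := beq_eq_false_iff_ne.mpr (Ne.symm hr)
    have hLb : (c == 'l') = false := beq_eq_false_iff_ne.mpr hL
    have hLc : ('l' == c) = false := beq_eq_false_iff_ne.mpr (Ne.symm hL)
    have hfb : (c == 'f') = false := beq_eq_false_iff_ne.mpr hf
    have hfc : ('f' == c) = false := beq_eq_false_iff_ne.mpr (Ne.symm hf)
    have hbb : (c == 'b') = false := beq_eq_false_iff_ne.mpr hb
    have hbc : ('b' == c) = false := beq_eq_false_iff_ne.mpr (Ne.symm hb)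
    simp [pvCharDict, PySem.Dict.get?_mk_cons, pvGet?_nil, pvFace, List.lookup, hub, huc, hdb, hdc, hrb, hrc, hLb, hLc, hfb, hfc, hbb, hbc]
  · simp only [pvExpandToken, hl]
    by_cases hu : c = 'u'
    · subst hu
      by_cases hm1 : m = '\''; · subst hm1; simp [pvCharDict, PySem.Dict.get?_mk_cons, pvGet?_nil, pvFace, List.lookup] <;> decide
      by_cases hm2 : m = '2'; · subst hm2; simp [pvCharDict, PySem.Dict.get?_mk_cons, pvGet?_nil, pvFace, List.lookup] <;> decide
      have hm1b : (m == '\'') = false := beq_eq_false_iff_ne.mpr hm1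
      have hm1c : ('\'' == m) = false := beq_eq_false_iff_ne.mpr (Ne.symm hm1)
      have hm2b : (m == '2') = false := beq_eq_false_iff_ne.mpr hm2
      have hm2c : ('2' == m) = false := beq_eq_false_iff_ne.mpr (Ne.symm hm2)
      simp [pvCharDict, PySem.Dict.get?_mk_cons, pvGet?_nil, pvFace, List.lookup, hm1b, hm1c, hm2b, hm2c, hm1, hm2]
    by_cases hd : c = 'd'
    · subst hd
      by_cases hm1 : m = '\''; · subst hm1; simp [pvCharDict, PySem.Dict.get?_mk_cons, pvGet?_nil, pvFace, List.lookup] <;> decide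
      by_cases hm2 : m = '2'; · subst hm2; simp [pvCharDict, PySem.Dict.get?_mk_cons, pvGet?_nil, pvFace, List.lookup] <;> decide
      have hm1b : (m == '\'') = false := beq_eq_false_iff_ne.mpr hm1
      have hm1c : ('\'' == m) = false := beq_eq_false_iff_ne.mpr (Ne.symm hm1)
      have hm2b : (m == '2') = false := beq_eq_false_iff_ne.mpr hm2
      have hm2c : ('2' == m) = false := beq_eq_false_iff_ne.mpr (Ne.symm hm2)
      simp [pvCharDict, PySem.Dict.get?_mk_cons, pvGet?_nil, pvFace, List.lookup, hm1b, hm1c, hm2b, hm2c, hm1, hm2]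
    by_cases hr : c = 'r'
    · subst hr
      by_cases hm1 : m = '\''; · subst hm1; simp [pvCharDict, PySem.Dict.get?_mk_cons, pvGet?_nil, pvFace, List.lookup] <;> decide
      by_cases hm2 : m = '2'; · subst hm2; simp [pvCharDict, PySem.Dict.get?_mk_cons, pvGet?_nil, pvFace, List.lookup] <;> decide
      have hm1b : (m == '\'') = false := beq_eq_false_iff_ne.mpr hm1
      have hm1c : ('\'' == m) = false := beq_eq_false_iff_ne.mpr (Ne.symm hm1)
      have hm2b : (m == '2') = false := beq_eq_false_iff_ne.mpr hm2
      have hm2c : ('2' == m) = false := beq_eq_false_iff_ne.mpr (Ne.symm hm2)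
      simp [pvCharDict, PySem.Dict.get?_mk_cons, pvGet?_nil, pvFace, List.lookup, hm1b, hm1c, hm2b, hm2c, hm1, hm2]
    by_cases hL : c = 'l'
    · subst hL
      by_cases hm1 : m = '\''; · subst hm1; simp [pvCharDict, PySem.Dict.get?_mk_cons, pvGet?_nil, pvFace, List.lookup] <;> decide
      by_cases hm2 : m = '2'; · subst hm2; simp [pvCharDict, PySem.Dict.get?_mk_cons, pvGet?_nil, pvFace, List.lookup] <;> decide
      have hm1b : (m == '\'') = false := beq_eq_false_iff_ne.mpr hm1
      have hm1c : ('\'' == m) = false := beq_eq_false_iff_ne.mpr (Ne.symm hm1)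
      have hm2b : (m == '2') = false := beq_eq_false_iff_ne.mpr hm2
      have hm2c : ('2' == m) = false := beq_eq_false_iff_ne.mpr (Ne.symm hm2)
      simp [pvCharDict, PySem.Dict.get?_mk_cons, pvGet?_nil, pvFace, List.lookup, hm1b, hm1c, hm2b, hm2c, hm1, hm2]
    by_cases hf : c = 'f'
    · subst hf
      by_cases hm1 : m = '\''; · subst hm1; simp [pvCharDict, PySem.Dict.get?_mk_cons, pvGet?_nil, pvFace, List.lookup] <;> decide
      by_cases hm2 : m = '2'; · subst hm2; simp [pvCharDict, PySem.Dict.get?_mk_cons, pvGet?_nil, pvFace, List.lookup] <;> decide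
      have hm1b : (m == '\'') = false := beq_eq_false_iff_ne.mpr hm1
      have hm1c : ('\'' == m) = false := beq_eq_false_iff_ne.mpr (Ne.symm hm1)
      have hm2b : (m == '2') = false := beq_eq_false_iff_ne.mpr hm2
      have hm2c : ('2' == m) = false := beq_eq_false_iff_ne.mpr (Ne.symm hm2)
      simp [pvCharDict, PySem.Dict.get?_mk_cons, pvGet?_nil, pvFace, List.lookup, hm1b, hm1c, hm2b, hm2c, hm1, hm2]
    by_cases hb : c = 'b'
    · subst hb
      by_cases hm1 : m = '\''; · subst hm1; simp [pvCharDict, PySem.Dict.get?_mk_cons, pvGet?_nil, pvFace, List.lookup] <;> decide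
      by_cases hm2 : m = '2'; · subst hm2; simp [pvCharDict, PySem.Dict.get?_mk_cons, pvGet?_nil, pvFace, List.lookup] <;> decide
      have hm1b : (m == '\'') = false := beq_eq_false_iff_ne.mpr hm1
      have hm1c : ('\'' == m) = false := beq_eq_false_iff_ne.mpr (Ne.symm hm1)
      have hm2b : (m == '2') = false := beq_eq_false_iff_ne.mpr hm2
      have hm2c : ('2' == m) = false := beq_eq_false_iff_ne.mpr (Ne.symm hm2)
      simp [pvCharDict, PySem.Dict.get?_mk_cons, pvGet?_nil, pvFace, List.lookup, hm1b, hm1c, hm2b, hm2c, hm1, hm2]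
    have hub : (c == 'u') = false := beq_eq_false_iff_ne.mpr hu
    have huc : ('u' == c) = false := beq_eq_false_iff_ne.mpr (Ne.symm hu)
    have hdb : (c == 'd') = false := beq_eq_false_iff_ne.mpr hd
    have hdc : ('d' == c) = false := beq_eq_false_iff_ne.mpr (Ne.symm hd)
    have hrb : (c == 'r') = false := beq_eq_false_iff_ne.mpr hr
    have hrc : ('r' == c) = false := beq_eq_false_iff_ne.mpr (Ne.symm hr)
    have hLb : (c == 'l') = false := beq_eq_false_iff_ne.mpr hL
    have hLc : ('l' == c) = false := beq_eq_false_iff_ne.mpr (Ne.symm hL)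
    have hfb : (c == 'f') = false := beq_eq_false_iff_ne.mpr hf
    have hfc : ('f' == c) = false := beq_eq_false_iff_ne.mpr (Ne.symm hf)
    have hbb : (c == 'b') = false := beq_eq_false_iff_ne.mpr hb
    have hbc : ('b' == c) = false := beq_eq_false_iff_ne.mpr (Ne.symm hb)
    simp [pvCharDict, PySem.Dict.get?_mk_cons, pvGet?_nil, pvFace, List.lookup, hub, huc, hdb, hdc, hrb, hrc, hLb, hLc, hfb, hfc, hbb, hbc]
  · simp only [pvExpandToken, hl]
    simp [pvCharDict, PySem.Dict.get?_mk_cons, pvGet?_nil]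

-- ===== VERDICT (by name: the statement is the Claim_ definition above) =====
theorem expand_wide_moves_spec : Claim_equal_expand_wide_moves := by
  intro sequence _
  unfold Spec_expand_wide_moves expand_wide_moves expand_wide_moves_alt
  have hfun : (fun (acc : List String) move =>
      match pvExpansions.get? (PySem.Str.lower move) with
      | some e => acc ++ e
      | none => acc ++ [move]) = fun acc move => acc ++ pvExpandToken move := by
    funext acc move
    rw [← pvTok_eq move]
    cases pvExpansions.get? (PySem.Str.lower move) <;> rfl
  rw [hfun]
  simp only [PySem.List.foldl_append_eq_flatMap, List.nil_append]
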